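-- pv_equiv track=rewrite | github.com/elaeon/dama_ml | src/dama/utils/order.py | order_from_ordered
-- ===== SOURCE A (Python) =====
-- def order_from_ordered(ordered, data):
--     """ build a ordered list from a desordered list with elems in ordered
--         ordered = [5, 3, 1, 6, 2] this elems are ordered acordenly to importance
--         data = [3, 2, 5]
--         result is [5, 3, 2]
--     """
--     index = {}
--     for i, elem in enumerate(ordered):
--         index[elem] = i
--
--     order_index = {}
--     for elem in data:
--         order_index[index[elem]] = elem
--
--     return [elem for i, elem in sorted(order_index.items(), key=lambda x:x[0])]
-- ===== SOURCE B (Python) =====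
-- def order_from_ordered(ordered, data):
--     """Single reverse pass over `ordered`: emit each element of `data` at its
--     last occurrence in `ordered`; no index dict, no sort.  Like the original,
--     raises KeyError if some element of data does not occur in ordered."""
--     dset = set(data)
--     out = []
--     seen = set()
--     for x in reversed(ordered):
--         if x in dset and x not in seen:
--             seen.add(x)
--             out.append(x)
--     if len(seen) != len(dset):
--         raise KeyError((dset - seen).pop())
--     out.reverse()
--     return out
-- ===== Notes on version B (the rewrite author's own statement) =====
-- stated objective: alternative
-- what changed: A builds an element-to-last-index dict, a second index-to-element dict, and sorts its items by key; B makes a single reverse pass over `ordered` with a membership set of `data` and a seen-set, emitting each data element at its last occurrence and reversing the result, so no index dict and no sort.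
import Mathlib
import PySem

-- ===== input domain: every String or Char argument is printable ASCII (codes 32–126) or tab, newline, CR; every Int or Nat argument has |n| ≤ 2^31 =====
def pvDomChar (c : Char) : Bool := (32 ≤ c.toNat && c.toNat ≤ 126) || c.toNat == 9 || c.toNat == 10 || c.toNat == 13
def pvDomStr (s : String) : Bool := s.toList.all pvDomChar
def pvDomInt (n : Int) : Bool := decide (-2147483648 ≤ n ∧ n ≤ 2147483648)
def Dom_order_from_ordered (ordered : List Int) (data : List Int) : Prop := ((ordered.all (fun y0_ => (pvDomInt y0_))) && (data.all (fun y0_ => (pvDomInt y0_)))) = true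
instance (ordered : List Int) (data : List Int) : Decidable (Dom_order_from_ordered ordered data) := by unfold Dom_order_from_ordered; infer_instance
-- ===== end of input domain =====

-- B replaces A's index dict + second dict + sort-by-key by one reverse pass over `ordered`
-- emitting each data element at its last occurrence (objective: alternative algorithm, no sort).

-- ===== PORT A =====
def order_from_ordered (ordered : List Int) (data : List Int) : List Int :=
  let index : PySem.Dict Int Int :=
    (PySem.List.enumerate ordered 0).foldl (fun d p => d.insert p.2 p.1) PySem.Dict.empty
  -- Python's index[elem] raises KeyError when elem ∉ ordered; Pre_ excludes exactly those
  -- inputs, so getD with any default is exact on Pre_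
  let orderIndex : PySem.Dict Int Int :=
    data.foldl (fun d e => d.insert (index.getD e 0) e) PySem.Dict.empty
  (PySem.List.sorted orderIndex.items (fun p => p.1) false).map (fun p => p.2)

-- ===== PORT B =====
-- Source B's final 'if len(seen) != len(dset): raise KeyError(...)' guard fires exactly when
-- some element of data is missing from ordered, i.e. only outside Pre_; a raise has no
-- value to model, so the port omits that branch and is exact on Pre_.
def order_from_ordered_alt (ordered : List Int) (data : List Int) : List Int :=
  let dset : PySem.Set Int := PySem.Set.ofList data
  let st : List Int × PySem.Set Int :=
    ordered.reverse.foldl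
      (fun st x =>
        if PySem.Set.contains dset x && !(PySem.Set.contains st.2 x) then
          (st.1 ++ [x], PySem.Set.add st.2 x)
        else st)
      ([], PySem.Set.empty)
  st.1.reverse

-- ===== PRECONDITION & SPEC =====
-- Pre_ excludes exactly the inputs on which Python A raises KeyError: some element of
-- data missing from ordered.
def Pre_order_from_ordered (ordered : List Int) (data : List Int) : Prop :=
  ∀ e ∈ data, e ∈ ordered
instance (ordered : List Int) (data : List Int) : Decidable (Pre_order_from_ordered ordered data) := by unfold Pre_order_from_ordered; infer_instance

def pvWitness_order_from_ordered : List Int × List Int := ([5, 3, 1, 6, 2], [3, 2, 5])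

def Spec_order_from_ordered (ordered : List Int) (data : List Int) (out : List Int) : Prop := out = order_from_ordered_alt ordered data
instance (ordered : List Int) (data : List Int) (out : List Int) : Decidable (Spec_order_from_ordered ordered data out) := by unfold Spec_order_from_ordered; infer_instance

-- ===== CLAIM (what is proved, stated in full; the proofs are below) =====
def Claim_equal_order_from_ordered : Prop := ∀ (ordered : List Int) (data : List Int), Dom_order_from_ordered ordered data → Pre_order_from_ordered ordered data → Spec_order_from_ordered ordered data (order_from_ordered ordered data)

-- ===== LEMMAS AND PROOFS =====

-- A's first loop: last-occurrence index dict.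
def mkIndex (ordered : List Int) : PySem.Dict Int Int :=
  (PySem.List.enumerate ordered 0).foldl (fun d p => d.insert p.2 p.1) PySem.Dict.empty

-- A's second loop.
def mkOI (ordered : List Int) (data : List Int) : PySem.Dict Int Int :=
  data.foldl (fun d e => d.insert ((mkIndex ordered).getD e 0) e) PySem.Dict.empty

-- the index of the last occurrence of v in l
def lidx (l : List Int) (v : Int) : Nat := l.length - 1 - l.reverse.idxOf v

-- B's loop body, abstracted: the selected elements (first occurrences among dset-members
-- not yet seen) of l, in traversal order.
def sel (dset : List Int) (seen : List Int) : List Int → List Int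
  | [] => []
  | x :: t => if x ∈ dset ∧ x ∉ seen then x :: sel dset (seen ++ [x]) t else sel dset seen t

lemma mkIndex_append (ys : List Int) (x : Int) :
    mkIndex (ys ++ [x]) = (mkIndex ys).insert x (ys.length : Int) := by
  simp [mkIndex, PySem.List.enumerate_append, PySem.List.enumerate_cons,
    PySem.List.enumerate_nil, List.foldl_append]

lemma get?_mkIndex (ordered : List Int) (v : Int) (h : v ∈ ordered) :
    (mkIndex ordered).get? v = some ((lidx ordered v : Nat) : Int) := by
  induction ordered using List.reverseRecOn with
  | nil => simp at h
  | append_singleton ys x ih =>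
    rw [mkIndex_append]
    by_cases hv : v = x
    · subst hv
      rw [PySem.Dict.get?_insert_self]
      simp [lidx, List.reverse_append]
    · rw [PySem.Dict.get?_insert_of_ne _ _ hv]
      have hvy : v ∈ ys := by
        rcases List.mem_append.mp h with h' | h'
        · exact h'
        · simp at h'; exact absurd h' hv
      rw [ih hvy]
      have hlt : ys.reverse.idxOf v < ys.length := by
        have := List.idxOf_lt_length_of_mem (List.mem_reverse.mpr hvy)
        simpa using this
      have : lidx (ys ++ [x]) v = lidx ys v := by
        simp only [lidx, List.reverse_append, List.length_append]
        rw [List.reverse_singleton]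
        rw [List.singleton_append, List.idxOf_cons_ne _ (Ne.symm hv)]
        simp
        omega
      rw [this]

lemma getD_mkIndex (ordered : List Int) (v : Int) (h : v ∈ ordered) :
    (mkIndex ordered).getD v 0 = ((lidx ordered v : Nat) : Int) :=
  PySem.Dict.getD_of_get?_eq_some _ _ (get?_mkIndex ordered v h)

lemma lidx_lt (l : List Int) (v : Int) (h : v ∈ l) : lidx l v < l.length := by
  have hne : l ≠ [] := by rintro rfl; simp at h
  have : 0 < l.length := List.length_pos_iff.mpr hne
  simp only [lidx]; omega

lemma getElem_lidx (l : List Int) (v : Int) (h : v ∈ l) :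
    l[lidx l v]'(lidx_lt l v h) = v := by
  have hm : v ∈ l.reverse := List.mem_reverse.mpr h
  have hlt : l.reverse.idxOf v < l.reverse.length := List.idxOf_lt_length_of_mem hm
  have := List.getElem_idxOf hlt
  rw [List.getElem_reverse] at this
  simpa [lidx] using this

lemma lidx_inj (l : List Int) (u w : Int) (hu : u ∈ l) (hw : w ∈ l)
    (h : lidx l u = lidx l w) : u = w := by
  have h1 := getElem_lidx l u hu
  have h2 := getElem_lidx l w hw
  rw [← h1, ← h2]
  congr 1

lemma lidx_lt_of_idxOf_rev (l : List Int) (a b : Int) (hb : b ∈ l)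
    (h : l.reverse.idxOf a < l.reverse.idxOf b) : lidx l b < lidx l a := by
  have hbl : l.reverse.idxOf b < l.length := by
    have := List.idxOf_lt_length_of_mem (List.mem_reverse.mpr hb); simpa using this
  simp only [lidx]; omega

lemma mkOI_append (ordered : List Int) (l : List Int) (x : Int) :
    mkOI ordered (l ++ [x]) = (mkOI ordered l).insert ((mkIndex ordered).getD x 0) x := by
  simp [mkOI, List.foldl_append]

lemma mem_items_mkOI (ordered data : List Int) (hsub : ∀ e ∈ data, e ∈ ordered)
    (p : Int × Int) :
    p ∈ (mkOI ordered data).items ↔ p.2 ∈ data ∧ p.1 = (mkIndex ordered).getD p.2 0 := by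
  induction data using List.reverseRecOn with
  | nil => simp [mkOI, PySem.Dict.empty]
  | append_singleton l x ih =>
    have hsub' : ∀ e ∈ l, e ∈ ordered := fun e he => hsub e (by simp [he])
    have hx : x ∈ ordered := hsub x (by simp)
    rw [mkOI_append, PySem.Dict.mem_items_insert, ih hsub']
    constructor
    · rintro (rfl | ⟨⟨h1, h2⟩, h3⟩)
      · simp
      · exact ⟨by simp [h1], h2⟩
    · rintro ⟨h1, h2⟩
      by_cases hpx : p.2 = x
      · left
        have : p.1 = (mkIndex ordered).getD x 0 := by rw [h2, hpx]
        calc p = (p.1, p.2) := rfl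
          _ = ((mkIndex ordered).getD x 0, x) := by rw [this, hpx]
      · right
        have h1' : p.2 ∈ l := by
          rcases List.mem_append.mp h1 with h' | h'
          · exact h'
          · simp at h'; exact absurd h' hpx
        refine ⟨⟨h1', h2⟩, ?_⟩
        intro hk
        rw [h2] at hk
        rw [getD_mkIndex _ _ (hsub' _ h1'), getD_mkIndex _ _ hx] at hk
        exact hpx (lidx_inj ordered p.2 x (hsub' _ h1') hx (by exact_mod_cast hk))

lemma nodup_items_mkOI (ordered data : List Int) : (mkOI ordered data).items.Nodup := by
  have hk : (mkOI ordered data).keys.Nodup := by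
    have := PySem.Dict.nodup_keys_foldl_insert_key (ν := Int) data
      (fun e => (mkIndex ordered).getD e 0) (fun _ e => e) PySem.Dict.empty
      PySem.Dict.nodup_keys_empty
    simpa [mkOI] using this
  exact List.Nodup.of_map _ hk

lemma sel_mem (dset seen l : List Int) (v : Int) :
    v ∈ sel dset seen l ↔ v ∈ l ∧ v ∈ dset ∧ v ∉ seen := by
  induction l generalizing seen with
  | nil => simp [sel]
  | cons x t ih =>
    simp only [sel]
    split_ifs with h
    · rw [List.mem_cons, ih, List.mem_append, List.mem_singleton, List.mem_cons]
      by_cases hvx : v = x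
      · subst hvx; simp [h.1, h.2]
      · constructor
        · rintro (h' | ⟨h1, h2, h3⟩)
          · exact absurd h' hvx
          · exact ⟨Or.inr h1, h2, fun hc => h3 (Or.inl hc)⟩
        · rintro ⟨h1 | h1, h2, h3⟩
          · exact absurd h1 hvx
          · refine Or.inr ⟨h1, h2, fun hc => ?_⟩
            rcases hc with hc | hc
            · exact h3 hc
            · exact hvx hc
    · rw [ih, List.mem_cons]
      by_cases hvx : v = x
      · subst hvx
        constructor
        · rintro ⟨h1, h2, h3⟩; exact ⟨Or.inr h1, h2, h3⟩
        · rintro ⟨_, h2, h3⟩; exact absurd ⟨h2, h3⟩ h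
      · constructor
        · rintro ⟨h1, h2, h3⟩; exact ⟨Or.inr h1, h2, h3⟩
        · rintro ⟨h1, h2, h3⟩
          rcases h1 with h1 | h1
          · exact absurd h1 hvx
          · exact ⟨h1, h2, h3⟩

lemma sel_nodup (dset seen l : List Int) : (sel dset seen l).Nodup := by
  induction l generalizing seen with
  | nil => simp [sel]
  | cons x t ih =>
    simp only [sel]
    split_ifs with h
    · refine List.Nodup.cons ?_ (ih _)
      intro hc
      have := (sel_mem _ _ _ _).mp hc
      exact this.2.2 (by simp)
    · exact ih _

lemma sel_pairwise (dset seen l : List Int) :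
    (sel dset seen l).Pairwise (fun a b => l.idxOf a < l.idxOf b) := by
  induction l generalizing seen with
  | nil => simp [sel]
  | cons x t ih =>
    have conv : ∀ (s : List Int), x ∉ sel dset s t →
        (sel dset s t).Pairwise (fun a b => (x :: t).idxOf a < (x :: t).idxOf b) := by
      intro s hx
      refine (ih s).imp_of_mem ?_
      intro a b ha hb hab
      have hax : a ≠ x := fun hc => hx (hc ▸ ha)
      have hbx : b ≠ x := fun hc => hx (hc ▸ hb)
      rw [List.idxOf_cons_ne _ (Ne.symm hax), List.idxOf_cons_ne _ (Ne.symm hbx)]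
      omega
    simp only [sel]
    split_ifs with h
    · refine List.Pairwise.cons ?_ (conv _ ?_)
      · intro b hb
        have hm := (sel_mem _ _ _ _).mp hb
        have hbx : b ≠ x := fun hc => hm.2.2 (by simp [hc])
        rw [List.idxOf_cons_self, List.idxOf_cons_ne _ (Ne.symm hbx)]
        omega
      · intro hc
        exact ((sel_mem _ _ _ _).mp hc).2.2 (by simp)
    · refine conv _ ?_
      intro hc
      have hm := (sel_mem _ _ _ _).mp hc
      rcases not_and_or.mp h with h' | h'
      · exact h' hm.2.1
      · exact hm.2.2 (not_not.mp h')

lemma foldl_sel (dset : PySem.Set Int) (l : List Int) (out : List Int) (seen : PySem.Set Int) :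
    (l.foldl
      (fun st x =>
        if PySem.Set.contains dset x && !(PySem.Set.contains st.2 x) then
          (st.1 ++ [x], PySem.Set.add st.2 x)
        else st)
      (out, seen)).1 = out ++ sel dset seen l := by
  induction l generalizing out seen with
  | nil => simp [sel]
  | cons x t ih =>
    simp only [List.foldl_cons, sel]
    by_cases h : x ∈ dset ∧ x ∉ seen
    · have hcond : (PySem.Set.contains dset x && !(PySem.Set.contains seen x)) = true := by
        simp [PySem.Set.contains, h.1, h.2]
      have hadd : PySem.Set.add seen x = seen ++ [x] := by
        simp [PySem.Set.add, PySem.Set.contains, h.2]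
      rw [if_pos hcond, if_pos h, ih, hadd, List.append_assoc]
      simp
    · have hcond : (PySem.Set.contains dset x && !(PySem.Set.contains seen x)) = false := by
        by_cases h1 : x ∈ dset
        · have h2 : x ∈ seen := by
            by_contra h2
            exact h ⟨h1, h2⟩
          simp [PySem.Set.contains, h2]
        · simp [PySem.Set.contains, h1]
      rw [if_neg (by rw [hcond]; simp), if_neg h]
      exact ih out seen

lemma alt_eq_sel (ordered data : List Int) :
    order_from_ordered_alt ordered data =
      (sel (PySem.Set.ofList data) [] ordered.reverse).reverse := by
  show (ordered.reverse.foldl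
      (fun st x =>
        if PySem.Set.contains (PySem.Set.ofList data) x && !(PySem.Set.contains st.2 x) then
          (st.1 ++ [x], PySem.Set.add st.2 x)
        else st)
      ([], PySem.Set.empty)).1.reverse = _
  rw [foldl_sel]
  rfl

theorem order_from_ordered_spec : Claim_equal_order_from_ordered := by
  intro ordered data _hdom hpre
  unfold Spec_order_from_ordered
  rw [alt_eq_sel]
  show (PySem.List.sorted (mkOI ordered data).items (fun p => p.1) false).map (fun p => p.2)
      = (sel (PySem.Set.ofList data) [] ordered.reverse).reverse
  set S := sel (PySem.Set.ofList data) [] ordered.reverse with hS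
  have hmemS : ∀ v, v ∈ S ↔ v ∈ data ∧ v ∈ ordered := by
    intro v
    rw [hS, sel_mem]
    simp [PySem.Set.mem_ofList]
    tauto
  set L := S.reverse.map (fun v => ((mkIndex ordered).getD v 0, v)) with hL
  have hsorted : PySem.List.sorted (mkOI ordered data).items (fun p => p.1) false = L := by
    apply PySem.List.sorted_eq_of_perm_of_pairwise_lt
    · -- L.Perm items
      apply (List.perm_ext_iff_of_nodup ?_ (nodup_items_mkOI ordered data)).mpr
      · intro p
        rw [mem_items_mkOI ordered data hpre]
        rw [hL]
        simp only [List.mem_map, List.mem_reverse]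
        constructor
        · rintro ⟨v, hv, rfl⟩
          have := (hmemS v).mp hv
          exact ⟨this.1, rfl⟩
        · rintro ⟨h1, h2⟩
          exact ⟨p.2, (hmemS p.2).mpr ⟨h1, hpre _ h1⟩, by rw [← h2]⟩
      · -- L nodup
        rw [hL]
        refine List.Nodup.map ?_ (List.nodup_reverse.mpr (sel_nodup _ _ _))
        intro a b hab
        simpa using congrArg Prod.snd hab
    · -- L pairwise key <
      rw [hL]
      rw [List.pairwise_map, List.pairwise_reverse]
      refine (sel_pairwise _ _ _).imp_of_mem ?_
      intro a b ha hb hab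
      have hao : a ∈ ordered := ((hmemS a).mp ha).2
      have hbo : b ∈ ordered := ((hmemS b).mp hb).2
      rw [getD_mkIndex _ _ hao, getD_mkIndex _ _ hbo]
      have := lidx_lt_of_idxOf_rev ordered a b hbo hab
      show ((lidx ordered b : Nat) : Int) < ((lidx ordered a : Nat) : Int)
      exact_mod_cast this
  rw [hsorted, hL, List.map_map]
  simp [Function.comp_def]
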